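-- pv_equiv track=rewrite | github.com/chenlab-sj/Seq2Karyotype | S2K/Genome.py | merge_contiguous_numbers
-- ===== SOURCE A (Python) =====
-- def merge_contiguous_numbers(states):
--     merges = []
--     start_index = 0
--     for i in range(1, len(states)):
--         if states[i] != states[i-1]:
--             merges.append((start_index, i-1))
--             start_index = i
--     merges.append((start_index, len(states)-1))
--     return merges
-- ===== SOURCE B (Python) =====
-- def merge_contiguous_numbers(states):
--     n = len(states)
--     boundaries = [i for i in range(1, n) if states[i] != states[i-1]]
--     starts = [0] + boundaries
--     ends = [b - 1 for b in boundaries] + [n - 1]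
--     return list(zip(starts, ends))
-- ===== Notes on version B (the rewrite author's own statement) =====
-- stated objective: alternative
-- what changed: B replaces A's single stateful scan (accumulating intervals and a running start index, with a trailing append) by computing the boundary-index table first and then pairing starts with ends in a separate zip pass.
import Mathlib
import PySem

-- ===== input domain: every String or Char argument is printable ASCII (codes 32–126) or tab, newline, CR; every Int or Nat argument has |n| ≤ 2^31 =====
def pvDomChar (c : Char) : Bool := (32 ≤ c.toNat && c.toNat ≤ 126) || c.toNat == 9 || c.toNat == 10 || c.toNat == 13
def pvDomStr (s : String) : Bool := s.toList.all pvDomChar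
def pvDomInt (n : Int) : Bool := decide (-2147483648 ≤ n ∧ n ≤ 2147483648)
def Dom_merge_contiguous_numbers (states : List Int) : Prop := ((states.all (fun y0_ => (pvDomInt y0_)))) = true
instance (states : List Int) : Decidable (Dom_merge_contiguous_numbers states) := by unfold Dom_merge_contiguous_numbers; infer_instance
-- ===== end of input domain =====

-- B rebuilds the intervals from a boundary-index table (filter + zip) instead of A's stateful scan; objective: alternative decomposition, same cost.
-- ===== PORT A =====
def merge_contiguous_numbers (states : List Int) : List (Int × Int) :=
  let st := (PySem.List.pyRange 1 (states.length : Int) 1).foldl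
    (fun (acc : List (Int × Int) × Int) i =>
      if PySem.List.pyGet? states i != PySem.List.pyGet? states (i-1) then
        (acc.1 ++ [(acc.2, i-1)], i)
      else acc) ([], 0)
  st.1 ++ [(st.2, (states.length : Int) - 1)]

-- ===== PORT B =====
def merge_contiguous_numbers_alt (states : List Int) : List (Int × Int) :=
  let n : Int := states.length
  let boundaries := (PySem.List.pyRange 1 n 1).filter
    (fun i => PySem.List.pyGet? states i != PySem.List.pyGet? states (i-1))
  let starts := 0 :: boundaries
  let ends := boundaries.map (fun b => b - 1) ++ [n - 1]
  starts.zip ends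

-- ===== PRECONDITION & SPEC =====
def Spec_merge_contiguous_numbers (states : List Int) (out : List (Int × Int)) : Prop := out = merge_contiguous_numbers_alt states
instance (states : List Int) (out : List (Int × Int)) : Decidable (Spec_merge_contiguous_numbers states out) := by unfold Spec_merge_contiguous_numbers; infer_instance

-- ===== CLAIM =====
def Claim_equal_merge_contiguous_numbers : Prop := ∀ (states : List Int), Dom_merge_contiguous_numbers states → Spec_merge_contiguous_numbers states (merge_contiguous_numbers states)

-- ===== LEMMAS AND PROOFS =====
-- Loop invariant: A's fold over any index list l, started at (acc, s), followed by the
-- trailing append, equals acc plus B's zip of (s :: boundaries-of-l) with their ends.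
theorem pv_loop_zip (p : Int → Bool) (n : Int) (l : List Int) :
    ∀ (acc : List (Int × Int)) (s : Int),
      ((l.foldl (fun (acc2 : List (Int × Int) × Int) i =>
          if p i then (acc2.1 ++ [(acc2.2, i-1)], i) else acc2) (acc, s)).1
        ++ [((l.foldl (fun (acc2 : List (Int × Int) × Int) i =>
          if p i then (acc2.1 ++ [(acc2.2, i-1)], i) else acc2) (acc, s)).2, n - 1)])
      = acc ++ (s :: l.filter p).zip ((l.filter p).map (fun b => b - 1) ++ [n - 1]) := by
  induction l with
  | nil => intro acc s; simp
  | cons i l ih =>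
    intro acc s
    by_cases h : p i
    · simp [List.foldl_cons, h, ih (acc ++ [(s, i-1)]) i]
    · simp [List.foldl_cons, h, ih acc s]

-- ===== VERDICT =====
theorem merge_contiguous_numbers_spec : Claim_equal_merge_contiguous_numbers := by
  intro states _
  unfold Spec_merge_contiguous_numbers merge_contiguous_numbers merge_contiguous_numbers_alt
  simpa using pv_loop_zip
    (fun i => PySem.List.pyGet? states i != PySem.List.pyGet? states (i-1))
    (states.length : Int) (PySem.List.pyRange 1 (states.length : Int) 1) [] 0
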